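-- pv_equiv track=rewrite | github.com/ai-tdd-labs/OpenCrashWOC | analysis/ghidra/tooling/extract_dwarf_locals.py | collapse_inline_structs
-- ===== SOURCE A (Python) =====
-- def collapse_inline_structs(s):
--     """
--     Collapse inline struct definitions to just 'struct {...}' for type extraction.
--     E.g., "struct { int x; int y; } * foo" -> "struct {...} * foo"
--     """
--     result = []
--     i = 0
--     while i < len(s):
--         if s[i] == '{':
--             depth = 1
--             i += 1
--             while i < len(s) and depth > 0:
--                 if s[i] == '{':
--                     depth += 1
--                 elif s[i] == '}':
--                     depth -= 1
--                 i += 1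
--             result.append('{...}')
--         else:
--             result.append(s[i])
--             i += 1
--     return ''.join(result)
-- ===== SOURCE B (Python) =====
-- def collapse_inline_structs(s):
--     """
--     Collapse inline struct definitions to just 'struct {...}' for type extraction.
--     Single flat pass with a persistent brace-depth counter.
--     """
--     out = []
--     depth = 0
--     for c in s:
--         if c == '{':
--             if depth == 0:
--                 out.append('{...}')
--             depth += 1
--         elif c == '}':
--             if depth > 0:
--                 depth -= 1
--             else:
--                 out.append('}')
--         elif depth == 0:
--             out.append(c)
--     return ''.join(out)
-- ===== Notes on version B (the rewrite author's own statement) =====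
-- stated objective: simpler
-- what changed: Replaced the nested inner while-loop scan with index arithmetic by one flat for-loop pass maintaining a persistent depth counter.
import Mathlib
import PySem

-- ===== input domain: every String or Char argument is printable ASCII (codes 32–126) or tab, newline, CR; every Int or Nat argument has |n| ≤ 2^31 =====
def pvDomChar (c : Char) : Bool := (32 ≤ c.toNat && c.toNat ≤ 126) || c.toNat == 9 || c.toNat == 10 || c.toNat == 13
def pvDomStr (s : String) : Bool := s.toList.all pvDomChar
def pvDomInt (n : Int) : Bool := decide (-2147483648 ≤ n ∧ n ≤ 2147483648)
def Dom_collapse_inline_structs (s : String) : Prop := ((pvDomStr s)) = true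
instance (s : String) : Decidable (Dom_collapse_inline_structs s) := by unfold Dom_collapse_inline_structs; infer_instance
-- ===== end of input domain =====

-- B: one flat pass with a persistent depth counter instead of A's nested inner while-loop (simpler decomposition).


-- ===== PORT A =====
-- A's inner while-loop: consume chars while i < len(s) and depth > 0
def pvSkipA (l : List Char) (depth : Nat) : List Char :=
  match l with
  | [] => []
  | c :: r =>
    if depth = 0 then l
    else pvSkipA r (if c = '{' then depth + 1 else if c = '}' then depth - 1 else depth)

-- termination fact for pvLoopA's recursive call on the inner loop's leftover
theorem pvSkipA_length_le (l : List Char) (d : Nat) : (pvSkipA l d).length ≤ l.length := by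
  induction l generalizing d with
  | nil => simp [pvSkipA]
  | cons c r ih =>
    unfold pvSkipA
    split
    · exact le_refl _
    · exact le_trans (ih _) (Nat.le_succ _)

-- A's outer while-loop over the remaining characters
def pvLoopA (l : List Char) : List String :=
  match l with
  | [] => []
  | c :: r =>
    if c = '{' then "{...}" :: pvLoopA (pvSkipA r 1)
    else String.singleton c :: pvLoopA r
  termination_by l.length
  decreasing_by
  · exact Nat.lt_succ_of_le (pvSkipA_length_le r 1)
  · simp

def collapse_inline_structs (s : String) : String := String.join (pvLoopA s.toList)

-- ===== PORT B =====
-- B's single flat pass carrying the persistent depth counter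
def pvLoopB (l : List Char) (depth : Nat) : List String :=
  match l with
  | [] => []
  | c :: r =>
    if c = '{' then (if depth = 0 then ["{...}"] else []) ++ pvLoopB r (depth + 1)
    else if c = '}' then
      (if depth > 0 then pvLoopB r (depth - 1) else "}" :: pvLoopB r depth)
    else (if depth = 0 then [String.singleton c] else []) ++ pvLoopB r depth

def collapse_inline_structs_alt (s : String) : String := String.join (pvLoopB s.toList 0)

-- ===== PRECONDITION & SPEC =====
def Spec_collapse_inline_structs (s : String) (out : String) : Prop := out = collapse_inline_structs_alt s
instance (s : String) (out : String) : Decidable (Spec_collapse_inline_structs s out) := by unfold Spec_collapse_inline_structs; infer_instance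

-- ===== CLAIM (what is proved, stated in full; the proofs are below) =====
def Claim_equal_collapse_inline_structs : Prop := ∀ (s : String), Dom_collapse_inline_structs s → Spec_collapse_inline_structs s (collapse_inline_structs s)

-- ===== LEMMAS AND PROOFS =====
-- while depth > 0, B appends nothing and lands exactly where A's inner scan ends
theorem pvLoopB_pos (l : List Char) : ∀ d : Nat, 0 < d → pvLoopB l d = pvLoopB (pvSkipA l d) 0 := by
  induction l with
  | nil => intro d _; simp [pvLoopB, pvSkipA]
  | cons c r ih =>
    intro d hd
    have hd0 : ¬ d = 0 := by omega
    simp only [pvLoopB, pvSkipA, if_neg hd0]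
    by_cases hc : c = '{'
    · simp [hc, ih (d + 1) (by omega)]
    · by_cases hc2 : c = '}'
      · subst hc2
        simp only [if_neg hc, if_pos hd]
        rcases Nat.lt_or_ge 1 d with h1 | h1
        · exact ih (d - 1) (by omega)
        · have : d - 1 = 0 := by omega
          rw [this, pvSkipA.eq_def]
          cases r <;> simp
      · simp [hc, hc2, ih d hd]

theorem pvLoopA_eq_aux : ∀ (n : Nat) (l : List Char), l.length ≤ n → pvLoopA l = pvLoopB l 0 := by
  intro n
  induction n with
  | zero =>
    intro l hl
    have : l = [] := List.eq_nil_of_length_eq_zero (by omega)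
    simp [this, pvLoopA, pvLoopB]
  | succ n ih =>
    intro l hl
    match l with
    | [] => simp [pvLoopA, pvLoopB]
    | c :: r =>
      rw [pvLoopA, pvLoopB]
      by_cases hc : c = '{'
      · have hr : (pvSkipA r 1).length ≤ n :=
          le_trans (pvSkipA_length_le r 1) (by simpa using hl)
        simp [hc, ih _ hr, pvLoopB_pos r 1 Nat.one_pos]
      · have hr : r.length ≤ n := by simpa using hl
        by_cases hc2 : c = '}'
        · subst hc2
          simp only [if_neg hc, ih r hr]
          norm_num
          rfl
        · simp [hc, hc2, ih r hr]

theorem pvLoopA_eq (l : List Char) : pvLoopA l = pvLoopB l 0 :=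
  pvLoopA_eq_aux l.length l le_rfl

-- ===== VERDICT (by name: the statement is the Claim_ definition above) =====
theorem collapse_inline_structs_spec : Claim_equal_collapse_inline_structs := by
  intro s _
  unfold Spec_collapse_inline_structs collapse_inline_structs collapse_inline_structs_alt
  rw [pvLoopA_eq]
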